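-- pv_equiv track=rewrite | github.com/xinhui01/gupiao | stock_data.py | _select_intraday_trade_date
-- ===== SOURCE A (Python) =====
-- from typing import Optional, List, Dict, Any, Callable, TypeVar, Tuple
--
-- def _select_intraday_trade_date(
--     trade_dates: List[str],
--     day_offset: int = 0,
--     target_trade_date: str = "",
-- ) -> Tuple[str, int]:
--     if not trade_dates:
--         return "", 0
--
--     normalized_target = str(target_trade_date or "").strip()
--     if normalized_target:
--         selected_trade_date = ""
--         if normalized_target in trade_dates:
--             selected_trade_date = normalized_target
--         else:
--             for candidate in reversed(trade_dates):
--                 if candidate <= normalized_target: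
--                     selected_trade_date = candidate
--                     break
--             if not selected_trade_date:
--                 selected_trade_date = trade_dates[0]
--         selected_index = trade_dates.index(selected_trade_date)
--         return selected_trade_date, selected_index - (len(trade_dates) - 1)
--
--     try:
--         request_offset = int(day_offset)
--     except (TypeError, ValueError):
--         request_offset = 0
--     max_back = len(trade_dates) - 1
--     applied_offset = max(-max_back, min(request_offset, 0))
--     selected_index = len(trade_dates) - 1 + applied_offset
--     return trade_dates[selected_index], applied_offset
-- ===== SOURCE B (Python) =====
-- def _select_intraday_trade_date(trade_dates, day_offset=0, target_trade_date=""):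
--     n = len(trade_dates)
--     if n == 0:
--         return "", 0
--     target = str(target_trade_date or "").strip()
--     if target:
--         # binary search: lo becomes the number of dates <= target
--         # (trade_dates is strictly ascending, per precondition)
--         lo, hi = 0, n
--         while lo < hi:
--             mid = (lo + hi) // 2
--             if target < trade_dates[mid]:
--                 hi = mid
--             else:
--                 lo = mid + 1
--         if lo == 0:
--             return trade_dates[0], -(n - 1)
--         return trade_dates[lo - 1], (lo - 1) - (n - 1)
--     off = max(-(n - 1), min(day_offset, 0))
--     return trade_dates[n - 1 + off], off
-- ===== Notes on version B (the rewrite author's own statement) =====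
-- stated objective: alternative
-- what changed: A resolves the target with up to three linear scans (membership test, reversed break-scan for the last date <= target, then list.index); B does one binary search whose insertion point directly gives both the selected date and its index; Pre_ requires trade_dates strictly ascending for date-targeted queries (the sorted, duplicate-free trade calendar this binary search needs) and so excludes unsorted or duplicate lists with a nonblank target, on which A still returns; offset-only queries are admitted for every list.
-- outside the precondition, e.g. on _select_intraday_trade_date(['b', 'a', 'c'], 0, 'b'): A returns ('b', -2), B returns ('a', -1); on _select_intraday_trade_date(['a', 'a'], 0, 'a'): A returns ('a', -1), B returns ('a', 0)
import Mathlib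
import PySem

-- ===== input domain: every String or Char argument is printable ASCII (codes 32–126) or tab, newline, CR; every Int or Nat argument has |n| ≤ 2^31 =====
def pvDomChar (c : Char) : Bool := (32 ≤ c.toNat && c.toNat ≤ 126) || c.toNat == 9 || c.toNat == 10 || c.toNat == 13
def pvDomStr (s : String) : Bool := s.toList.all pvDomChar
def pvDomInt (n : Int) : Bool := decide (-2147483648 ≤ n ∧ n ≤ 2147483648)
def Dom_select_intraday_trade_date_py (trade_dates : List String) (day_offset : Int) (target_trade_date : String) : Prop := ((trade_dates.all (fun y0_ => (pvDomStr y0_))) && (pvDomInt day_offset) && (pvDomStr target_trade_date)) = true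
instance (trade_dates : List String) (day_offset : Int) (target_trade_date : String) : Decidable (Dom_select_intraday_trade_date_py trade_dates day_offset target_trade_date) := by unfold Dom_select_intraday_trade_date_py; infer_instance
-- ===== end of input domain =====

-- B replaces A's up-to-three linear scans (membership test, reversed break-scan, `.index`) by one
-- binary search on the strictly ascending trade calendar Pre_ requires; objective: alternative.

-- ===== PORT A =====
-- A's `for candidate in reversed(trade_dates): if candidate <= nt: selected = candidate; break`
-- with selected initialised to "" (applied to trade_dates.reverse).
def pvScanRev (nt : String) : List String → String
  | [] => ""
  | c :: rest => if c ≤ nt then c else pvScanRev nt rest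

def select_intraday_trade_date_py (trade_dates : List String) (day_offset : Int) (target_trade_date : String) : String × Int :=
  if trade_dates = [] then ("", 0)
  else
    let normalized_target := PySem.Str.strip target_trade_date
    if normalized_target ≠ "" then
      let selected_trade_date :=
        if normalized_target ∈ trade_dates then normalized_target
        else
          let s := pvScanRev normalized_target trade_dates.reverse
          if s = "" then trade_dates.headD "" else s
      -- `.index` never raises here: selected_trade_date is always an element
      let selected_index : Int := (((PySem.List.index? trade_dates selected_trade_date).getD 0 : Nat) : Int)
      (selected_trade_date, selected_index - ((trade_dates.length : Int) - 1))
    else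
      let request_offset := day_offset
      let max_back : Int := (trade_dates.length : Int) - 1
      let applied_offset := max (-max_back) (min request_offset 0)
      let selected_index := (trade_dates.length : Int) - 1 + applied_offset
      (PySem.List.pyGetD trade_dates selected_index "", applied_offset)

-- ===== PORT B =====
-- B's hand-written `while lo < hi` binary-search loop (bisect_right insertion point).
def pvBisLoop (l : List String) (t : String) (lo hi : Nat) : Nat :=
  if _h : lo < hi then
    if t < l.getD ((lo + hi) / 2) "" then pvBisLoop l t lo ((lo + hi) / 2)
    else pvBisLoop l t ((lo + hi) / 2 + 1) hi
  else lo
termination_by hi - lo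
decreasing_by all_goals omega

def select_intraday_trade_date_py_alt (trade_dates : List String) (day_offset : Int) (target_trade_date : String) : String × Int :=
  let n : Int := PySem.List.len trade_dates
  if n = 0 then ("", 0)
  else
    let target := PySem.Str.strip target_trade_date
    if target ≠ "" then
      let lo := pvBisLoop trade_dates target 0 trade_dates.length
      if lo = 0 then (PySem.List.pyGetD trade_dates 0 "", -(n - 1))
      else (PySem.List.pyGetD trade_dates ((lo : Int) - 1) "", ((lo : Int) - 1) - (n - 1))
    else
      let off := max (-(n - 1)) (min day_offset 0)
      (PySem.List.pyGetD trade_dates (n - 1 + off) "", off)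

-- ===== PRECONDITION & SPEC =====
-- Pre_ DOES exclude inputs A returns on: date-targeted queries over an unsorted or
-- duplicate-carrying list. B's binary search needs the trade calendar strictly ascending (its
-- intended shape); only the target branch consults the order, so offset-only queries (a target
-- that strips to "") are admitted for every list.
def Pre_select_intraday_trade_date_py (trade_dates : List String) (day_offset : Int) (target_trade_date : String) : Prop :=
  PySem.Str.strip target_trade_date = "" ∨ List.Pairwise (fun a b => a.toList < b.toList) trade_dates
instance (trade_dates : List String) (day_offset : Int) (target_trade_date : String) : Decidable (Pre_select_intraday_trade_date_py trade_dates day_offset target_trade_date) := by unfold Pre_select_intraday_trade_date_py; infer_instance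

def pvWitness_select_intraday_trade_date_py : List String × Int × String := (["20240101", "20240102"], 0, "20240102")

def Spec_select_intraday_trade_date_py (trade_dates : List String) (day_offset : Int) (target_trade_date : String) (out : String × Int) : Prop := out = select_intraday_trade_date_py_alt trade_dates day_offset target_trade_date
instance (trade_dates : List String) (day_offset : Int) (target_trade_date : String) (out : String × Int) : Decidable (Spec_select_intraday_trade_date_py trade_dates day_offset target_trade_date out) := by unfold Spec_select_intraday_trade_date_py; infer_instance

-- ===== CLAIM (what is proved, stated in full; the proofs are below) =====
def Claim_equal_select_intraday_trade_date_py : Prop := ∀ (trade_dates : List String) (day_offset : Int) (target_trade_date : String), Dom_select_intraday_trade_date_py trade_dates day_offset target_trade_date → Pre_select_intraday_trade_date_py trade_dates day_offset target_trade_date → Spec_select_intraday_trade_date_py trade_dates day_offset target_trade_date (select_intraday_trade_date_py trade_dates day_offset target_trade_date)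

-- ===== LEMMAS AND PROOFS =====

-- "" is the bottom of the String order
theorem pvEmptyLe (s : String) : "" ≤ s := le_of_not_gt (by
  intro h
  rw [String.lt_iff_toList_lt] at h
  cases hs : s.toList <;> rw [hs] at h <;> cases h)

-- characterisation of B's binary-search loop on a list with monotone entries
theorem pvBisLoop_char (l : List String) (t : String)
    (hmono : ∀ i j (_ : i < l.length) (hj : j < l.length), i ≤ j → l[i] ≤ l[j])
    (lo hi : Nat) (hlo : lo ≤ hi) (hhi : hi ≤ l.length) :
    lo ≤ pvBisLoop l t lo hi ∧ pvBisLoop l t lo hi ≤ hi ∧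
    (∀ j (hj : j < l.length), lo ≤ j → j < pvBisLoop l t lo hi → l[j] ≤ t) ∧
    (∀ j (hj : j < l.length), pvBisLoop l t lo hi ≤ j → j < hi → t < l[j]) := by
  fun_induction pvBisLoop l t lo hi with
  | case1 lo hi h hlt ih =>
    have hmid : (lo + hi) / 2 < l.length := by omega
    rw [List.getD_eq_getElem l "" hmid] at hlt
    obtain ⟨i1, i2, i3, i4⟩ := ih (by omega) (by omega)
    refine ⟨i1, by omega, i3, ?_⟩
    intro j hj h1 h2
    by_cases hc : j < (lo + hi) / 2
    · exact i4 j hj h1 hc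
    · exact lt_of_lt_of_le hlt (hmono _ j hmid hj (by omega))
  | case2 lo hi h hlt ih =>
    have hmid : (lo + hi) / 2 < l.length := by omega
    rw [List.getD_eq_getElem l "" hmid] at hlt
    have hle : l[(lo + hi) / 2] ≤ t := le_of_not_gt hlt
    obtain ⟨i1, i2, i3, i4⟩ := ih (by omega) hhi
    refine ⟨by omega, i2, ?_, i4⟩
    intro j hj h1 h2
    by_cases hc : (lo + hi) / 2 + 1 ≤ j
    · exact i3 j hj hc h2
    · exact le_trans (hmono j _ hj hmid (by omega)) hle
  | case3 lo hi h =>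
    refine ⟨le_refl _, hlo, ?_, ?_⟩ <;> (intro j hj h1 h2; omega)

-- on a strictly sorted list the filter (≤ t) is an initial segment take k
theorem pvFilter_take (l : List String) (t : String) (k : Nat) (hk : k ≤ l.length)
    (h1 : ∀ j (hj : j < l.length), j < k → l[j] ≤ t)
    (h2 : ∀ j (hj : j < l.length), k ≤ j → t < l[j]) :
    l.filter (fun c => decide (c ≤ t)) = l.take k := by
  conv_lhs => rw [← List.take_append_drop k l]
  rw [List.filter_append]
  have ht : (l.take k).filter (fun c => decide (c ≤ t)) = l.take k := by
    apply List.filter_eq_self.mpr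
    intro x hx
    obtain ⟨i, hi, rfl⟩ := List.mem_iff_getElem.mp hx
    have hil : i < l.length := by
      have := hi; simp [List.length_take] at this; omega
    rw [List.getElem_take]
    exact decide_eq_true (h1 i hil (by have := hi; simp [List.length_take] at this; omega))
  have hd : (l.drop k).filter (fun c => decide (c ≤ t)) = [] := by
    apply List.filter_eq_nil_iff.mpr
    intro x hx
    obtain ⟨i, hi, rfl⟩ := List.mem_iff_getElem.mp hx
    rw [List.getElem_drop]
    have hil : k + i < l.length := by
      have := hi; simp [List.length_drop] at this; omega
    simp only [decide_eq_true_eq]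
    exact not_le_of_gt (h2 (k + i) hil (by omega))
  rw [ht, hd, List.append_nil]

-- A's break-scan is head-of-filter
theorem pvScanRev_eq_filter (t : String) (m : List String) :
    pvScanRev t m = ((m.filter (fun c => decide (c ≤ t))).head?).getD "" := by
  induction m with
  | nil => rfl
  | cons c rest ih =>
    by_cases h : c ≤ t
    · simp only [pvScanRev, h, if_true, List.filter_cons, decide_true, List.head?_cons,
        Option.getD_some]
    · simp only [pvScanRev, h, if_false, List.filter_cons, decide_false, ih,
        Bool.false_eq_true]

-- index of the j-th element of a nodup list is j
theorem pvIndex_getElem (l : List String) (hnd : l.Nodup) (j : Nat) (hj : j < l.length) :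
    PySem.List.index? l l[j] = some j := by
  rw [PySem.List.index?_eq_some_iff]
  refine ⟨l.take j, l.drop (j + 1), ?_, by simp [List.length_take]; omega, ?_⟩
  · conv_lhs => rw [← List.take_append_drop j l]
    rw [List.drop_eq_getElem_cons hj]
  · intro hmem
    obtain ⟨i, hi, hieq⟩ := List.mem_iff_getElem.mp hmem
    have hil : i < l.length := by have := hi; simp [List.length_take] at this; omega
    have hij : i < j := by have := hi; simp [List.length_take] at this; omega
    rw [List.getElem_take] at hieq
    exact absurd (List.Nodup.getElem_inj_iff hnd |>.mp hieq) (by omega)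

theorem select_intraday_trade_date_py_spec : Claim_equal_select_intraday_trade_date_py := by
  intro l doff tgt _ hpre0
  unfold Spec_select_intraday_trade_date_py select_intraday_trade_date_py select_intraday_trade_date_py_alt
  by_cases hl : l = []
  · simp [hl, PySem.List.len]
  · have hlen0 : 0 < l.length := List.length_pos_iff.mpr hl
    have hn : ¬ (PySem.List.len l = 0) := by
      rw [PySem.List.len_eq]; intro h; have := Int.natCast_eq_zero.mp h; omega
    rw [if_neg hl, if_neg hn]
    by_cases htt : PySem.Str.strip tgt = ""
    · rw [htt]
      simp only [ne_eq, not_true_eq_false, if_false]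
      rw [PySem.List.len_eq]
    · have hpre : List.Pairwise (· < ·) l := by
        rcases hpre0 with h | h
        · exact absurd h htt
        · exact h.imp (fun h' => String.lt_iff_toList_lt.mpr h')
      have hmono : ∀ i j (_ : i < l.length) (hj : j < l.length), i ≤ j → l[i] ≤ l[j] := by
        intro i j hi hj hij
        rcases Nat.lt_or_ge i j with h | h
        · exact le_of_lt (List.pairwise_iff_getElem.mp hpre i j hi hj h)
        · have hij' : i = j := by omega
          subst hij'; exact le_refl _
      have hnd : l.Nodup := hpre.imp ne_of_lt
      simp only [ne_eq, htt, not_false_eq_true, if_true]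
      set t := PySem.Str.strip tgt with ht
      set k := pvBisLoop l t 0 l.length with hk
      obtain ⟨-, hkle, hA, hB⟩ := pvBisLoop_char l t hmono 0 l.length (Nat.zero_le _) (le_refl _)
      have hfilter := pvFilter_take l t k hkle (fun j hj hjk => hA j hj (Nat.zero_le _) hjk)
        (fun j hj hkj => hB j hj hkj hj)
      have hscan : pvScanRev t l.reverse = ((l.take k).getLast?).getD "" := by
        rw [pvScanRev_eq_filter, List.filter_reverse, List.head?_reverse, hfilter]
      by_cases hk0 : k = 0
      · -- k = 0 : target below every date; both pick the first date
        have hnotmem : t ∉ l := by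
          intro hmem
          obtain ⟨j, hj, hjt⟩ := List.mem_iff_getElem.mp hmem
          have := hB j hj (by omega) hj
          rw [hjt] at this
          exact lt_irrefl t this
        rw [if_neg hnotmem, if_pos hk0]
        have hs : pvScanRev t l.reverse = "" := by rw [hscan, hk0]; simp
        rw [hs, if_pos rfl]
        have hhead : l.headD "" = l[0] := by
          cases l with
          | nil => exact absurd rfl hl
          | cons a r => rfl
        have hpg0 : PySem.List.pyGetD l 0 "" = l[0] := by
          rw [PySem.List.pyGetD_eq_getElem l "" le_rfl (by exact_mod_cast hlen0)]
          simp
        rw [hhead, hpg0, pvIndex_getElem l hnd 0 hlen0, PySem.List.len_eq]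
        simp only [Prod.mk.injEq, Option.getD_some, Nat.cast_zero]
        exact ⟨by trivial, by ring⟩
      · -- k > 0 : both pick l[k-1]
        have hk1 : k - 1 < l.length := by omega
        have hck : l[k - 1] ≤ t := hA (k - 1) hk1 (Nat.zero_le _) (by omega)
        have hlast : (l.take k).getLast? = some l[k - 1] := by
          have hlt : (l.take k).length = k := by simp [List.length_take]; omega
          rw [List.getLast?_eq_getElem?, hlt,
            List.getElem?_eq_getElem (by rw [hlt]; omega), List.getElem_take]
        have hscan' : pvScanRev t l.reverse = l[k - 1] := by rw [hscan, hlast]; rfl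
        have hidx := pvIndex_getElem l hnd (k - 1) hk1
        have hpgk : PySem.List.pyGetD l ((k : Int) - 1) "" = l[k - 1] := by
          rw [PySem.List.pyGetD_eq_getElem l "" (by omega) (by omega)]
          congr 1
          omega
        have harith : (((k - 1 : Nat) : Int)) - ((l.length : Int) - 1) =
            ((k : Int) - 1) - (PySem.List.len l - 1) := by
          rw [PySem.List.len_eq]; omega
        by_cases hmem : t ∈ l
        · have hct : l[k - 1] = t := by
            obtain ⟨j, hj, hjt⟩ := List.mem_iff_getElem.mp hmem
            have hjk : j < k := by
              by_contra hc
              have := hB j hj (by omega) hj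
              rw [hjt] at this
              exact lt_irrefl t this
            have h1 : l[j] ≤ l[k - 1] := hmono j (k - 1) hj hk1 (by omega)
            rw [hjt] at h1
            exact le_antisymm hck h1
          rw [if_pos hmem, if_neg hk0, ← hct, hidx, hpgk]
          simp only [Prod.mk.injEq, Option.getD_some]
          exact ⟨by trivial, harith⟩
        · rw [if_neg hmem, if_neg hk0, hscan', hpgk]
          by_cases hemp : l[k - 1] = ""
          · rw [if_pos hemp]
            have h0 : l.headD "" = l[k - 1] := by
              have ha : l[0] ≤ l[k - 1] := hmono 0 (k - 1) hlen0 hk1 (Nat.zero_le _)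
              have hb2 : l[k - 1] ≤ l[0] := by rw [hemp]; exact pvEmptyLe _
              have hhead : l.headD "" = l[0] := by
                cases l with
                | nil => exact absurd rfl hl
                | cons a r => rfl
              rw [hhead]; exact le_antisymm ha hb2
            rw [h0, hidx]
            simp only [Prod.mk.injEq, Option.getD_some]
            exact ⟨by trivial, harith⟩
          · rw [if_neg hemp, hidx]
            simp only [Prod.mk.injEq, Option.getD_some]
            exact ⟨by trivial, harith⟩
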